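-- pv_equiv track=rewrite | github.com/axitgdrx/ggs | football_polymarket_api.py | _find_winner_market
-- ===== SOURCE A (Python) =====
-- from typing import Dict, List, Optional
--
-- def _find_winner_market(markets: List[Dict], title: str):
--     for market in markets:
--         if market.get("question") == title:
--             return market
--
--     for market in markets:
--         question = market.get("question", "")
--         if "win" in question.lower() and "draw" not in question.lower():
--             return market
--
--     return None
-- ===== SOURCE B (Python) =====
-- def _find_winner_market(markets, title):
--     fallback = None
--     for market in markets:
--         if market.get("question") == title:
--             return market
--         if fallback is None:
--             q = market.get("question", "").lower()
--             if "win" in q and "draw" not in q: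
--                 fallback = market
--     return fallback
-- ===== Notes on version B (the rewrite author's own statement) =====
-- stated objective: alternative
-- what changed: Replaces A's two full scans (exact match, then 'win'-heuristic) by a single pass that returns an exact match immediately and records the first heuristic candidate in a fallback accumulator.
import Mathlib
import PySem

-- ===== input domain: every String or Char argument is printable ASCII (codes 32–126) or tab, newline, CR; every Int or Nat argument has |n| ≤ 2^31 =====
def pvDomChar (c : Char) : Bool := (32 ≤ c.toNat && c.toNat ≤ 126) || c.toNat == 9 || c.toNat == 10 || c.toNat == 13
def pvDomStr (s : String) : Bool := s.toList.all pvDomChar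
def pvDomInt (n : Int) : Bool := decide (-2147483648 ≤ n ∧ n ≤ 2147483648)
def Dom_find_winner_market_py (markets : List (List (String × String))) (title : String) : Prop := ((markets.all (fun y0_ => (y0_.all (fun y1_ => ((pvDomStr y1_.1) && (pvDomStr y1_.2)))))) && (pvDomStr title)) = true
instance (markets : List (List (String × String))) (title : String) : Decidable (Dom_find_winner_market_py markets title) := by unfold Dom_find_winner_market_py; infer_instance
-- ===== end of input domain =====

-- B replaces A's two full scans by a single pass with a fallback accumulator; same return value.


-- ===== PORT A =====
-- market.get("question") == title  (None == str is False, so equality with `some title`)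
def pvExact (title : String) (m : List (String × String)) : Bool :=
  PySem.Dict.get? ⟨m⟩ "question" == some title

-- "win" in question.lower() and "draw" not in question.lower(), question = market.get("question", "")
def pvHeur (m : List (String × String)) : Bool :=
  let question := PySem.Dict.getD ⟨m⟩ "question" ""
  PySem.Str.isIn "win" (PySem.Str.lower question) && !(PySem.Str.isIn "draw" (PySem.Str.lower question))

def pvLoop1 (title : String) : List (List (String × String)) → Option (List (String × String))
  | [] => none
  | m :: rest => if pvExact title m then some m else pvLoop1 title rest

def pvLoop2 : List (List (String × String)) → Option (List (String × String))
  | [] => none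
  | m :: rest => if pvHeur m then some m else pvLoop2 rest

def find_winner_market_py (markets : List (List (String × String))) (title : String) : Option (List (String × String)) :=
  match pvLoop1 title markets with
  | some m => some m
  | none =>
    match pvLoop2 markets with
    | some m => some m
    | none => none

-- ===== PORT B =====
def pvBGo (title : String) : List (List (String × String)) → Option (List (String × String)) → Option (List (String × String))
  | [], fallback => fallback
  | m :: rest, fallback =>
    if PySem.Dict.get? ⟨m⟩ "question" == some title then some m
    else pvBGo title rest
      (if fallback.isNone then
        let q := PySem.Str.lower (PySem.Dict.getD ⟨m⟩ "question" "")
        if PySem.Str.isIn "win" q && !(PySem.Str.isIn "draw" q) then some m else fallback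
       else fallback)

def find_winner_market_py_alt (markets : List (List (String × String))) (title : String) : Option (List (String × String)) :=
  pvBGo title markets none

-- ===== PRECONDITION & SPEC =====
def Spec_find_winner_market_py (markets : List (List (String × String))) (title : String) (out : Option (List (String × String))) : Prop := out = find_winner_market_py_alt markets title
instance (markets : List (List (String × String))) (title : String) (out : Option (List (String × String))) : Decidable (Spec_find_winner_market_py markets title out) := by unfold Spec_find_winner_market_py; infer_instance

-- ===== CLAIM (what is proved, stated in full; the proofs are below) =====
def Claim_equal_find_winner_market_py : Prop := ∀ (markets : List (List (String × String))) (title : String), Dom_find_winner_market_py markets title → Spec_find_winner_market_py markets title (find_winner_market_py markets title)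

-- ===== LEMMAS AND PROOFS =====
-- B's single pass equals: exact-match scan first, then the pending fallback, then the heuristic scan.
theorem pvBGo_eq (title : String) (ms : List (List (String × String)))
    (fb : Option (List (String × String))) :
    pvBGo title ms fb =
      match pvLoop1 title ms with
      | some m => some m
      | none => match fb with
        | some f => some f
        | none => pvLoop2 ms := by
  induction ms generalizing fb with
  | nil => cases fb <;> rfl
  | cons m rest ih =>
    simp only [pvBGo, pvLoop1, pvLoop2, pvExact, pvHeur]
    by_cases hx : (PySem.Dict.get? ⟨m⟩ "question" == some title) = true
    · simp [hx]
    · simp only [hx, if_neg, Bool.not_eq_true, ih]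
      cases fb with
      | some f => simp
      | none =>
        simp only [Option.isNone_none, if_true]
        split_ifs <;> rfl

-- ===== VERDICT (by name: the statement is the Claim_ definition above) =====
theorem find_winner_market_py_spec : Claim_equal_find_winner_market_py := by
  intro markets title _
  unfold Spec_find_winner_market_py find_winner_market_py find_winner_market_py_alt
  rw [pvBGo_eq]
  cases pvLoop1 title markets <;> cases h2 : pvLoop2 markets <;> simp
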